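-- pv_equiv track=rewrite | github.com/ThaumielSparrow/LodeRunner | code/tools/xml.py | find_tag_end
-- ===== SOURCE A (Python) =====
-- def find_tag_end(xml, start):
--
--     in_quote = False
--     i = start
--
--     while (i < len(xml)):
--
--         if (xml[i] == "'"):
--             in_quote = (not in_quote)
--
--         elif (xml[i] == ">"):
--
--             if (in_quote):
--                 pass
--
--             else:
--                 return i
--
--         i += 1
--
--     # We didn't find the end of the tag; it's apparently an invalid xml document.
--     return -1
-- ===== SOURCE B (Python) =====
-- def find_tag_end(xml, start):
--     # Decide each '>' by quote parity over the prefix xml[start:i] instead of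
--     # carrying a running in_quote flag.
--     for i in range(start, len(xml)):
--         if xml[i] == ">" and xml[start:i].count("'") % 2 == 0:
--             return i
--     return -1
-- ===== Notes on version B (the rewrite author's own statement) =====
-- stated objective: alternative
-- what changed: Replaces A's single-pass state machine with a running in_quote boolean by a stateless scan that judges each '>' candidate by the parity of single quotes in the prefix xml[start:i].
-- outside the precondition, e.g. on find_tag_end("'ab>", -4): A returns 3, B returns -1; on find_tag_end('a', -5): A raises IndexError, B raises IndexError
import Mathlib
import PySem

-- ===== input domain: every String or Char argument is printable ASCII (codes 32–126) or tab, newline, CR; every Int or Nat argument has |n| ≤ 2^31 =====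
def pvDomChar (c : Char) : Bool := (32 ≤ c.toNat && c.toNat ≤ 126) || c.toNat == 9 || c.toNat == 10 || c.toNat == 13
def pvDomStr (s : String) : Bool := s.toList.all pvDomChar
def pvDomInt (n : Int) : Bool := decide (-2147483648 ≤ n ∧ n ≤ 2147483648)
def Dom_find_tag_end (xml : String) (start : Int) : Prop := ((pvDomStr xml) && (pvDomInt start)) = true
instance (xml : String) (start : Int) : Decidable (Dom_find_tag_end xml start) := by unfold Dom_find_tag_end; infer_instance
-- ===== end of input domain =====

-- B replaces A's running in_quote boolean by a per-candidate quote-parity test over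
-- the prefix xml[start:i] — a structurally different (stateless, O(n^2)) scan; not faster.


-- ===== PORT A =====
-- A's while loop, step for step (fuel = number of remaining iterations, enough by construction);
-- xml[i] via pyGet? (none = IndexError, unreached under Pre_)
def find_tag_end_loopA (s : List Char) : Nat → Int → Bool → Int
  | 0, _, _ => -1
  | fuel + 1, i, in_quote =>
    if i < (s.length : Int) then
      match PySem.List.pyGet? s i with
      | none => -1   -- IndexError; excluded by Pre_find_tag_end
      | some c =>
        if c = '\'' then find_tag_end_loopA s fuel (i + 1) (!in_quote)
        else if c = '>' then
          if in_quote then find_tag_end_loopA s fuel (i + 1) in_quote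
          else i
        else find_tag_end_loopA s fuel (i + 1) in_quote
    else -1

def find_tag_end (xml : String) (start : Int) : Int :=
  find_tag_end_loopA xml.toList ((xml.toList.length : Int) - start).toNat start false

-- ===== PORT B =====
-- for i in range(start, len(xml)): if xml[i] == '>' and xml[start:i].count("'") % 2 == 0: return i
def find_tag_end_loopB (s : List Char) (start : Int) : Nat → Int → Int
  | 0, _ => -1
  | fuel + 1, i =>
    if i < (s.length : Int) then
      if PySem.List.pyGet? s i = some '>' ∧
          (PySem.List.slice s (some start) (some i)).count '\'' % 2 = 0 then i
      else find_tag_end_loopB s start fuel (i + 1)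
    else -1

def find_tag_end_alt (xml : String) (start : Int) : Int :=
  find_tag_end_loopB xml.toList start ((xml.toList.length : Int) - start).toNat start

-- ===== PRECONDITION & SPEC =====
-- Pre_ excludes negative start: there A raises IndexError when start < -len(xml), and for
-- -len(xml) <= start < 0 Python's negative indexing makes A scan the tail and then the whole
-- string again while reporting negative positions — a corner no caller of an XML tag scanner
-- would specify, and B's prefix-parity reading of it is equally defensible.
def Pre_find_tag_end (xml : String) (start : Int) : Prop := 0 ≤ start
instance (xml : String) (start : Int) : Decidable (Pre_find_tag_end xml start) := by unfold Pre_find_tag_end; infer_instance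
def pvWitness_find_tag_end : String × Int := (">", 0)
def Spec_find_tag_end (xml : String) (start : Int) (out : Int) : Prop := out = find_tag_end_alt xml start
instance (xml : String) (start : Int) (out : Int) : Decidable (Spec_find_tag_end xml start out) := by unfold Spec_find_tag_end; infer_instance

-- ===== CLAIM (what is proved, stated in full; the proofs are below) =====
def Claim_equal_find_tag_end : Prop := ∀ (xml : String) (start : Int), Dom_find_tag_end xml start → Pre_find_tag_end xml start → Spec_find_tag_end xml start (find_tag_end xml start)

-- ===== LEMMAS AND PROOFS =====

-- invariant: A's in_quote at index i equals the parity of quotes in s[start:i]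
lemma loop_eq (s : List Char) (start : Int) (hs : 0 ≤ start) :
    ∀ (fuel : Nat) (i : Int) (q : Bool), (s.length : Int) - i ≤ (fuel : Int) → start ≤ i →
      q = decide ((PySem.List.slice s (some start) (some i)).count '\'' % 2 = 1) →
      find_tag_end_loopA s fuel i q = find_tag_end_loopB s start fuel i := by
  intro fuel
  induction fuel with
  | zero =>
    intro i q _ _ _
    rfl
  | succ fuel ih =>
    intro i q hm hsi hq
    rw [find_tag_end_loopA, find_tag_end_loopB]
    by_cases h : i < (s.length : Int)
    · have hi0 : 0 ≤ i := le_trans hs hsi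
      have hidx : i.toNat < s.length := by omega
      have hi' : ((i.toNat : Nat) : Int) = i := Int.toNat_of_nonneg hi0
      have hc : PySem.List.pyGet? s i = some s[i.toNat] := by
        conv_lhs => rw [← hi']
        rw [PySem.List.pyGet?_natCast, List.getElem?_eq_getElem hidx]
      -- extending the slice by one character
      have key : PySem.List.slice s (some start) (some (i + 1))
          = PySem.List.slice s (some start) (some i) ++ [s[i.toNat]] := by
        rw [PySem.List.slice_toNat s hs hi0, PySem.List.slice_toNat s hs (by omega)]
        have h1 : (i + 1).toNat - start.toNat = (i.toNat - start.toNat) + 1 := by omega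
        rw [h1, List.take_add_one, List.getElem?_drop]
        have h2 : start.toNat + (i.toNat - start.toNat) = i.toNat := by omega
        rw [h2, List.getElem?_eq_getElem hidx]
        rfl
      simp only [h, if_pos, hc]
      by_cases hquote : s[i.toNat] = '\''
      · -- quote character: A toggles, B's '>' test fails
        have hbne : ¬ ((some s[i.toNat] = some ('>' : Char)) ∧
            (PySem.List.slice s (some start) (some i)).count '\'' % 2 = 0) := by
          rintro ⟨hp, -⟩; rw [hquote] at hp; exact absurd hp (by decide)
        rw [if_pos hquote, if_neg hbne]
        apply ih (i + 1) (!q) (by push_cast; omega) (by omega)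
        rw [key, hquote, List.count_append]
        have hcnt : ([('\'' : Char)]).count '\'' = 1 := by decide
        rw [hcnt]
        cases q with
        | false => simp only [Bool.not_false]
                   simp only [false_eq_decide_iff] at hq
                   simp only [true_eq_decide_iff]
                   omega
        | true  => simp only [Bool.not_true]
                   simp only [true_eq_decide_iff] at hq
                   simp only [false_eq_decide_iff]
                   omega
      · have hkeep : (PySem.List.slice s (some start) (some (i + 1))).count '\''
            = (PySem.List.slice s (some start) (some i)).count '\'' := by
          rw [key, List.count_append]
          have : ([s[i.toNat]]).count '\'' = 0 := by
            simp [hquote]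
          omega
        by_cases hgt : s[i.toNat] = '>'
        · -- '>' character: A returns i unless in_quote; B tests parity
          cases q with
          | false =>
            have hpar : (PySem.List.slice s (some start) (some i)).count '\'' % 2 = 0 := by
              simp only [false_eq_decide_iff] at hq; omega
            have hcond : (some s[i.toNat] = some ('>' : Char)) ∧
                (PySem.List.slice s (some start) (some i)).count '\'' % 2 = 0 :=
              ⟨by rw [hgt], hpar⟩
            rw [if_neg hquote, if_pos hgt, if_pos hcond]
            simp
          | true =>
            have hpar : (PySem.List.slice s (some start) (some i)).count '\'' % 2 = 1 := by
              simpa using hq.symm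
            have hncond : ¬ ((some s[i.toNat] = some ('>' : Char)) ∧
                (PySem.List.slice s (some start) (some i)).count '\'' % 2 = 0) := by
              rintro ⟨-, hp⟩; omega
            rw [if_neg hquote, if_pos hgt, if_neg hncond, if_pos rfl]
            apply ih (i + 1) true (by push_cast; omega) (by omega)
            rw [hkeep]; exact hq
        · -- ordinary character: both just advance
          have hncond : ¬ ((some s[i.toNat] = some ('>' : Char)) ∧
              (PySem.List.slice s (some start) (some i)).count '\'' % 2 = 0) := by
            rintro ⟨hp, -⟩; exact hgt (by injection hp)
          rw [if_neg hquote, if_neg hgt, if_neg hncond]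
          apply ih (i + 1) q (by push_cast; omega) (by omega)
          rw [hkeep]; exact hq
    · simp [h]

theorem find_tag_end_spec : Claim_equal_find_tag_end := by
  intro xml start _ hpre
  unfold Spec_find_tag_end find_tag_end find_tag_end_alt
  refine loop_eq xml.toList start hpre (((xml.toList.length : Int) - start).toNat) start false
    (by omega) le_rfl ?_
  have h0 : PySem.List.slice xml.toList (some start) (some start) = [] := by
    rw [PySem.List.slice_toNat _ hpre hpre]; simp
  rw [h0]
  decide
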